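-- pv_equiv track=rewrite | github.com/ricopen19/OCR_to_doc | export_excel_poc.py | _row_signature
-- ===== SOURCE A (Python) =====
-- def _row_signature(owner_row: list[int | None]) -> tuple[int, ...]:
--     """行のセル境界（結合含む）を signature 化する。"""
--
--     if not owner_row:
--         return tuple()
--
--     def normalize(v: int | None, col_index: int):
--         # None（JSON 上でセル定義が欠ける）を連結扱いにしないよう、列ごとに別IDにする
--         return v if v is not None else ("__none__", col_index)
--
--     sig: list[int] = []
--     last = normalize(owner_row[0], 0)
--     run = 1
--     for col_index, x in enumerate(owner_row[1:], start=1):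
--         nx = normalize(x, col_index)
--         if nx == last:
--             run += 1
--             continue
--         sig.append(run)
--         last = nx
--         run = 1
--     sig.append(run)
--     return tuple(sig)
-- ===== SOURCE B (Python) =====
-- def _row_signature(owner_row):
--     """Boundary-index decomposition: normalize once, list boundary positions, then diff."""
--     if not owner_row:
--         return tuple()
--     n = len(owner_row)
--     normalized = [v if v is not None else ("__none__", i) for i, v in enumerate(owner_row)]
--     boundaries = [0]
--     i = 1
--     for a, b in zip(normalized, normalized[1:]):
--         if a != b:
--             boundaries.append(i)
--         i += 1
--     boundaries.append(n)
--     return tuple(b - a for a, b in zip(boundaries, boundaries[1:]))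
-- ===== Notes on version B (the rewrite author's own statement) =====
-- stated objective: alternative
-- what changed: Instead of streaming run-length counting with last/run state, B normalizes the row once, collects the boundary indices where adjacent normalized cells differ (bracketed by 0 and n), and returns the consecutive differences of that boundary list.
import Mathlib
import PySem

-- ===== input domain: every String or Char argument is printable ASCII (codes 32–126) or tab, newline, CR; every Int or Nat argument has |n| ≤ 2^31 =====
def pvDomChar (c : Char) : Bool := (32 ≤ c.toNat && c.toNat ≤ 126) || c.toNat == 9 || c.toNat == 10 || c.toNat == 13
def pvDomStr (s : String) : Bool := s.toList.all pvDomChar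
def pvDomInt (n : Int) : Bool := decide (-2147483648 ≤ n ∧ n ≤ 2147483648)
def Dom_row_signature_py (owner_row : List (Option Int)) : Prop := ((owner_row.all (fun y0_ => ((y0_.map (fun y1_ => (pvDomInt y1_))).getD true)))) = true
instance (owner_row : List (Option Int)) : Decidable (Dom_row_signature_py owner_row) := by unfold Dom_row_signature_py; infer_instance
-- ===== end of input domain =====

-- B builds the boundary-index list of the normalized row and returns its consecutive differences,
-- instead of A's streaming last/run run-length counter; same cost, different decomposition.

-- normalize(v, col_index): an int stays itself, None becomes the per-column tag ("__none__", col_index)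
def pvNormalize (v : Option Int) (i : Int) : Sum Int (String × Int) :=
  match v with
  | some x => Sum.inl x
  | none => Sum.inr ("__none__", i)

-- ===== PORT A =====
-- the for-loop over enumerate(owner_row[1:], start=1) with state (last, run, sig)
def pvALoop (i : Int) (last : Sum Int (String × Int)) (run : Int) (sig : List Int) :
    List (Option Int) → List Int
  | [] => sig ++ [run]
  | x :: rest =>
    let nx := pvNormalize x i
    if nx = last then pvALoop (i + 1) last (run + 1) sig rest
    else pvALoop (i + 1) nx 1 (sig ++ [run]) rest

def row_signature_py (owner_row : List (Option Int)) : List Int :=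
  match owner_row with
  | [] => []
  | x :: xs => pvALoop 1 (pvNormalize x 0) 1 [] xs

-- ===== PORT B =====
-- the list comprehension [normalize(v,i) for i,v in enumerate(owner_row)]
def pvNormFrom (i : Int) : List (Option Int) → List (Sum Int (String × Int))
  | [] => []
  | x :: xs => pvNormalize x i :: pvNormFrom (i + 1) xs

-- the for-loop over zip(normalized, normalized[1:]) collecting boundary indices
def pvBLoop (i : Int) : List ((Sum Int (String × Int)) × (Sum Int (String × Int))) → List Int
  | [] => []
  | (a, b) :: rest => if a ≠ b then i :: pvBLoop (i + 1) rest else pvBLoop (i + 1) rest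

def row_signature_py_alt (owner_row : List (Option Int)) : List Int :=
  match owner_row with
  | [] => []
  | _ =>
    let n : Int := owner_row.length
    let normalized := pvNormFrom 0 owner_row
    let boundaries := (0 :: pvBLoop 1 (normalized.zip (normalized.drop 1))) ++ [n]
    (boundaries.zip (boundaries.drop 1)).map (fun p => p.2 - p.1)

-- ===== PRECONDITION & SPEC =====
def Spec_row_signature_py (owner_row : List (Option Int)) (out : List Int) : Prop := out = row_signature_py_alt owner_row
instance (owner_row : List (Option Int)) (out : List Int) : Decidable (Spec_row_signature_py owner_row out) := by unfold Spec_row_signature_py; infer_instance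

-- ===== CLAIM (what is proved, stated in full; the proofs are below) =====
def Claim_equal_row_signature_py : Prop := ∀ (owner_row : List (Option Int)), Dom_row_signature_py owner_row → Spec_row_signature_py owner_row (row_signature_py owner_row)

-- ===== LEMMAS AND PROOFS =====

-- consecutive differences of a boundary list, seen from a previous value
def pvDiffsFrom (p : Int) : List Int → List Int
  | [] => []
  | b :: bs => (b - p) :: pvDiffsFrom b bs

theorem pv_zip_map_diffs : ∀ (l : List Int) (b : Int),
    (((b :: l).zip l).map (fun p => p.2 - p.1)) = pvDiffsFrom b l
  | [], _ => rfl
  | c :: cs, b => by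
    simp only [List.zip_cons_cons, List.map_cons, pvDiffsFrom, pv_zip_map_diffs cs c]

theorem pv_aLoop_eq_diffs (xs : List (Option Int)) :
    ∀ (v : Option Int) (j r : Int) (sig : List Int),
    pvALoop (j + 1) (pvNormalize v j) r sig xs
      = sig ++ pvDiffsFrom (j + 1 - r)
          (pvBLoop (j + 1)
            ((pvNormFrom j (v :: xs)).zip ((pvNormFrom j (v :: xs)).drop 1))
           ++ [j + 1 + (xs.length : Int)]) := by
  induction xs with
  | nil =>
    intro v j r sig
    simp [pvALoop, pvNormFrom, pvBLoop, pvDiffsFrom]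
  | cons x rest ih =>
    intro v j r sig
    have hzip : (pvNormFrom j (v :: x :: rest)).zip ((pvNormFrom j (v :: x :: rest)).drop 1)
        = (pvNormalize v j, pvNormalize x (j + 1)) ::
          ((pvNormFrom (j + 1) (x :: rest)).zip ((pvNormFrom (j + 1) (x :: rest)).drop 1)) := by
      simp [pvNormFrom, List.zip]
    rw [hzip]
    have hlen : j + 1 + 1 + ((rest.length : Int)) = j + 1 + (((x :: rest).length : Int)) := by
      push_cast [List.length_cons]; ring
    by_cases h : pvNormalize x (j + 1) = pvNormalize v j
    · have hb : pvBLoop (j + 1) ((pvNormalize v j, pvNormalize x (j + 1)) ::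
          ((pvNormFrom (j + 1) (x :: rest)).zip ((pvNormFrom (j + 1) (x :: rest)).drop 1)))
          = pvBLoop (j + 1 + 1)
            ((pvNormFrom (j + 1) (x :: rest)).zip ((pvNormFrom (j + 1) (x :: rest)).drop 1)) := by
        simp [pvBLoop, h]
      rw [hb]
      have ha : pvALoop (j + 1) (pvNormalize v j) r sig (x :: rest)
          = pvALoop (j + 1 + 1) (pvNormalize x (j + 1)) (r + 1) sig rest := by
        simp [pvALoop, h]
      have harith : j + 1 + 1 - (r + 1) = j + 1 - r := by ring
      rw [ha, ih x (j + 1) (r + 1) sig, harith, hlen]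
    · have hb : pvBLoop (j + 1) ((pvNormalize v j, pvNormalize x (j + 1)) ::
          ((pvNormFrom (j + 1) (x :: rest)).zip ((pvNormFrom (j + 1) (x :: rest)).drop 1)))
          = (j + 1) :: pvBLoop (j + 1 + 1)
            ((pvNormFrom (j + 1) (x :: rest)).zip ((pvNormFrom (j + 1) (x :: rest)).drop 1)) := by
        simp [pvBLoop]
        exact fun hvx => absurd hvx.symm h
      rw [hb]
      have ha : pvALoop (j + 1) (pvNormalize v j) r sig (x :: rest)
          = pvALoop (j + 1 + 1) (pvNormalize x (j + 1)) 1 (sig ++ [r]) rest := by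
        simp [pvALoop, h]
      rw [ha, ih x (j + 1) 1 (sig ++ [r])]
      have h1 : j + 1 - (j + 1 - r) = r := by ring
      have h2 : j + 1 + 1 - 1 = j + 1 := by ring
      simp only [List.cons_append, pvDiffsFrom, h1, h2, hlen, List.append_assoc,
        List.nil_append]

-- ===== VERDICT (by name: the statement is the Claim_ definition above) =====
theorem row_signature_py_spec : Claim_equal_row_signature_py := by
  intro owner_row _
  unfold Spec_row_signature_py
  match owner_row with
  | [] => rfl
  | x :: xs =>
    show pvALoop 1 (pvNormalize x 0) 1 [] xs = _
    have h := pv_aLoop_eq_diffs xs x 0 1 []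
    simp only [zero_add] at h
    rw [h]
    unfold row_signature_py_alt
    simp only [List.cons_append, List.drop_one, List.tail_cons]
    rw [pv_zip_map_diffs]
    have hlen : (1 : Int) + (xs.length : Int) = (((x :: xs).length : Int)) := by
      push_cast [List.length_cons]; ring
    rw [hlen]
    norm_num
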